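-- pv_equiv track=rewrite | github.com/ysenousy/ACC-Explainability-AEC | backend/compliance_report_generator.py | _determine_item_status
-- ===== SOURCE A (Python) =====
-- from typing import Dict, Any, List, Optional
--
-- def _determine_item_status(rules_results: List[Dict]) -> str:
--     """Determine overall compliance status of item.
--
--     Logic:
--     - If any REQUIRED rule (ERROR severity) fails → "fail"
--     - If any OPTIONAL rule (WARNING severity) fails → "partial"
--     - If all required rules pass → "pass"
--     - If only unknown (optional properties not found) → "pass" (still compliant)
--     """
--     if not rules_results:
--         return "no_rules"
--
--     statuses = [r["status"] for r in rules_results]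
--     severities = {}  # Map status to severity
--     for rule in rules_results:
--         status = rule["status"]
--         severity = rule.get("severity", "ERROR")
--         if status not in severities:
--             severities[status] = []
--         severities[status].append(severity)
--
--     # If any REQUIRED (ERROR) rule fails, item fails
--     if "fail" in statuses:
--         failed_rules = [r for r in rules_results if r["status"] == "fail"]
--         if any(r.get("severity") == "ERROR" for r in failed_rules):
--             return "fail"
--         # If only WARNING rules fail, mark as partial
--         return "partial"
--
--     # If only "unknown" (optional properties) remain, still pass
--     if all(s == "unknown" for s in statuses):
--         return "pass"
--
--     # If only "unknown" and "pass", still pass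
--     if all(s in ["unknown", "pass"] for s in statuses):
--         return "pass"
--
--     # Otherwise pass (all critical rules passed)
--     return "pass"
-- ===== SOURCE B (Python) =====
-- def _determine_item_status(rules_results):
--     if not rules_results:
--         return "no_rules"
--     has_fail = False
--     has_error_fail = False
--     for r in rules_results:
--         if r["status"] == "fail":
--             has_fail = True
--             if r.get("severity") == "ERROR":
--                 has_error_fail = True
--     if has_error_fail:
--         return "fail"
--     if has_fail:
--         return "partial"
--     return "pass"
-- ===== Notes on version B (the rewrite author's own statement) =====
-- stated objective: simpler
-- what changed: Replaced the statuses comprehension, the unused severities grouping dict, the failed-rules filter with any(), and the two all() scans by one pass with two boolean flags (has_fail, has_error_fail).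
import Mathlib
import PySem

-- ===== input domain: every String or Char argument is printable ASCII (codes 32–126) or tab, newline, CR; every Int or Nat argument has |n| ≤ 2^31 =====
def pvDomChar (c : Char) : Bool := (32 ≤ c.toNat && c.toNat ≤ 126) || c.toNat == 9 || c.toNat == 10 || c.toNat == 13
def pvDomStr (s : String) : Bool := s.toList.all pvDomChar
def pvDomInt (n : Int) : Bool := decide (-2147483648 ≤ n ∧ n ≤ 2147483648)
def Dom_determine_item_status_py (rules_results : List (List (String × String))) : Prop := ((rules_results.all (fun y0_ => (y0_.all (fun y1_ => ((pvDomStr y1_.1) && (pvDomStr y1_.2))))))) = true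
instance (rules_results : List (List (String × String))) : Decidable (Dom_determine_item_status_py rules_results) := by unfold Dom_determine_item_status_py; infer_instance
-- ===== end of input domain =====

-- B replaces A's several scans (statuses comprehension, unused severities dict, filter+any, two all()s) by one pass with two boolean flags; same result.
-- ===== PORT A =====
def determine_item_status_py (rules_results : List (List (String × String))) : String :=
  if rules_results = [] then "no_rules"
  else
    let statuses := rules_results.map (fun r => (PySem.Dict.mk r).get? "status")
    let _severities := rules_results.foldl
      (fun (d : PySem.Dict (Option String) (List String)) rule =>
        let status := (PySem.Dict.mk rule).get? "status"
        let severity := (PySem.Dict.mk rule).getD "severity" "ERROR"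
        let d := if d.contains status then d else d.insert status []
        d.modify status [] (fun l => l ++ [severity])) PySem.Dict.empty
    if (some "fail") ∈ statuses then
      let failed_rules := rules_results.filter (fun r => (PySem.Dict.mk r).get? "status" == some "fail")
      if failed_rules.any (fun r => (PySem.Dict.mk r).get? "severity" == some "ERROR") then "fail"
      else "partial"
    else if statuses.all (fun s => s == some "unknown") then "pass"
    else if statuses.all (fun s => s == some "unknown" || s == some "pass") then "pass"
    else "pass"

-- ===== PORT B =====
def determine_item_status_py_alt (rules_results : List (List (String × String))) : String :=
  if rules_results = [] then "no_rules"
  else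
    let st := rules_results.foldl
      (fun (acc : Bool × Bool) r =>
        if (PySem.Dict.mk r).get? "status" == some "fail" then
          (true, acc.2 || ((PySem.Dict.mk r).get? "severity" == some "ERROR"))
        else acc) (false, false)
    if st.2 then "fail" else if st.1 then "partial" else "pass"

-- ===== PRECONDITION & SPEC =====
-- Pre_ excludes rule dicts missing the "status" key, on which Python A raises KeyError.
def Pre_determine_item_status_py (rules_results : List (List (String × String))) : Prop :=
  ∀ r ∈ rules_results, "status" ∈ r.map Prod.fst
instance (rules_results : List (List (String × String))) : Decidable (Pre_determine_item_status_py rules_results) := by unfold Pre_determine_item_status_py; infer_instance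
def pvWitness_determine_item_status_py : (List (List (String × String))) :=
  [[("status", "fail"), ("severity", "WARNING")], [("status", "pass")]]
def Spec_determine_item_status_py (rules_results : List (List (String × String))) (out : String) : Prop := out = determine_item_status_py_alt rules_results
instance (rules_results : List (List (String × String))) (out : String) : Decidable (Spec_determine_item_status_py rules_results out) := by unfold Spec_determine_item_status_py; infer_instance

-- ===== CLAIM (what is proved, stated in full; the proofs are below) =====
def Claim_equal_determine_item_status_py : Prop := ∀ (rules_results : List (List (String × String))), Dom_determine_item_status_py rules_results → Pre_determine_item_status_py rules_results → Spec_determine_item_status_py rules_results (determine_item_status_py rules_results)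

-- ===== LEMMAS AND PROOFS =====
def pvIsF (r : List (String × String)) : Bool := (PySem.Dict.mk r).get? "status" == some "fail"
def pvIsE (r : List (String × String)) : Bool := (PySem.Dict.mk r).get? "severity" == some "ERROR"

theorem pv_fold_B (l : List (List (String × String))) (a b : Bool) :
    l.foldl (fun (acc : Bool × Bool) r =>
        if (PySem.Dict.mk r).get? "status" == some "fail" then
          (true, acc.2 || ((PySem.Dict.mk r).get? "severity" == some "ERROR"))
        else acc) (a, b)
    = (a || l.any pvIsF, b || l.any (fun r => pvIsF r && pvIsE r)) := by
  induction l generalizing a b with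
  | nil => simp
  | cons r t ih =>
    simp only [List.foldl_cons, List.any_cons]
    by_cases h : pvIsF r = true
    · rw [if_pos (by simpa [pvIsF] using h), ih]
      simp [h, pvIsE, Bool.or_assoc]
    · rw [if_neg (by simpa [pvIsF] using h), ih]
      simp [Bool.eq_false_iff.mpr h]

theorem determine_item_status_py_spec : Claim_equal_determine_item_status_py := by
  intro l _ _
  unfold Spec_determine_item_status_py determine_item_status_py determine_item_status_py_alt
  by_cases hnil : l = []
  · simp [hnil]
  · rw [if_neg hnil, if_neg hnil, pv_fold_B]
    by_cases hf : l.any pvIsF = true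
    · have hmem : (some "fail") ∈ l.map (fun r => (PySem.Dict.mk r).get? "status") := by
        rcases List.any_eq_true.mp hf with ⟨r, hr, hfr⟩
        refine List.mem_map.mpr ⟨r, hr, ?_⟩
        simp only [pvIsF, beq_iff_eq] at hfr
        simp [hfr]
      rw [if_pos hmem]
      have hany : (l.filter (fun r => (PySem.Dict.mk r).get? "status" == some "fail")).any
            (fun r => (PySem.Dict.mk r).get? "severity" == some "ERROR")
          = l.any (fun r => pvIsF r && pvIsE r) := by
        simp [List.any_filter, pvIsF, pvIsE]
      simp only [hany]
      by_cases he : l.any (fun r => pvIsF r && pvIsE r) = true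
      · simp [he]
      · simp [Bool.eq_false_iff.mpr he, hf]
    · have hf' : l.any pvIsF = false := Bool.eq_false_iff.mpr hf
      have hmem : (some "fail") ∉ l.map (fun r => (PySem.Dict.mk r).get? "status") := by
        intro hm
        rcases List.mem_map.mp hm with ⟨r, hr, hfr⟩
        exact hf (List.any_eq_true.mpr ⟨r, hr, by simp [pvIsF, hfr]⟩)
      have he : l.any (fun r => pvIsF r && pvIsE r) = false := by
        simp only [List.any_eq_false] at hf' ⊢
        intro r hr
        simp [hf' r hr]
      rw [if_neg hmem]
      simp only [hf', he, Bool.false_or, if_neg (Bool.false_ne_true)]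
      split_ifs <;> rfl
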